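-- pv_equiv track=rewrite | github.com/zons-zhaozhy/hermes-agent | plugins/memory/hindsight/__init__.py | _sanitize_bank_segment
-- ===== SOURCE A (Python) =====
-- def _sanitize_bank_segment(value: str) -> str:
--     """Sanitize a bank_id_template placeholder value.
--
--     Bank IDs should be safe for URL paths and filesystem use. Replaces any
--     character that isn't alphanumeric, dash, or underscore with a dash, and
--     collapses runs of dashes.
--     """
--     if not value:
--         return ""
--     out = []
--     prev_dash = False
--     for ch in str(value):
--         if ch.isalnum() or ch == "-" or ch == "_":
--             out.append(ch)
--             prev_dash = False
--         else:
--             if not prev_dash: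
--                 out.append("-")
--                 prev_dash = True
--     return "".join(out).strip("-_")
-- ===== SOURCE B (Python) =====
-- def _sanitize_bank_segment(value: str) -> str:
--     """Sanitize a bank_id_template placeholder value.
--
--     Run-based rewrite: scan maximal runs of same-classified characters;
--     an allowed run is copied verbatim, a disallowed run becomes one dash.
--     """
--     if not value:
--         return ""
--     s = str(value)
--     parts = []
--     i, n = 0, len(s)
--     while i < n:
--         k = s[i].isalnum() or s[i] in "-_"
--         j = i + 1
--         while j < n and (s[j].isalnum() or s[j] in "-_") == k:
--             j += 1
--         parts.append(s[i:j] if k else "-")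
--         i = j
--     return "".join(parts).strip("-_")
-- ===== Notes on version B (the rewrite author's own statement) =====
-- stated objective: alternative
-- what changed: Replaces the per-character loop with a prev_dash flag by a run-based scanner: it finds each maximal run of same-classified characters at once, copies allowed runs verbatim and emits a single dash per disallowed run, so no per-character state flag is carried.
import Mathlib
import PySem

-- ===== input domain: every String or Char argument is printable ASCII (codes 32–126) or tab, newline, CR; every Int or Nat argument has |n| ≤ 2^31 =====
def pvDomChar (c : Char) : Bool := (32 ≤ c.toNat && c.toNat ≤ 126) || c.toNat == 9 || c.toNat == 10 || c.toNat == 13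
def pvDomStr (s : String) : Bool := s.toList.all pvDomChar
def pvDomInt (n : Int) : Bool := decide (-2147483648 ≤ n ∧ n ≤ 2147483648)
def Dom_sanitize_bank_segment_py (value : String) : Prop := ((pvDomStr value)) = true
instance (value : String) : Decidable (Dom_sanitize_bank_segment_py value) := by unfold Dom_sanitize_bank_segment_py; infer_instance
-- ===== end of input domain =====

-- B replaces A's per-character prev_dash flag by a run-based scanner (same cost, different structure).

-- ===== PORT A =====
-- one step of A's for-loop: state = (out, prev_dash)
def pvStepA (st : List Char × Bool) (ch : Char) : List Char × Bool :=
  if PySem.Chars.isalnum ch || ch == '-' || ch == '_' then (st.1 ++ [ch], false)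
  else if !st.2 then (st.1 ++ ['-'], true) else (st.1, true)

def sanitize_bank_segment_py (value : String) : String :=
  if value = "" then ""
  else
    let st := value.toList.foldl pvStepA ([], false)
    PySem.Str.stripChars (String.ofList st.1) "-_"

-- ===== PORT B =====
def pvAllowedB (c : Char) : Bool := PySem.Chars.isalnum c || c == '-' || c == '_'

-- the outer while loop of Source B: take the maximal run of chars classified like the head
def pvScanB : List Char → List Char
  | [] => []
  | c :: cs =>
    let k := pvAllowedB c
    let run := cs.takeWhile (fun d => pvAllowedB d == k)
    let rest := cs.dropWhile (fun d => pvAllowedB d == k)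
    (if k then c :: run else ['-']) ++ pvScanB rest
termination_by l => l.length
decreasing_by
  have := List.length_dropWhile_le (p := fun d => pvAllowedB d == pvAllowedB c) (l := cs)
  simp only [List.length_cons]; omega

def sanitize_bank_segment_py_alt (value : String) : String :=
  if value = "" then ""
  else PySem.Str.stripChars (String.ofList (pvScanB value.toList)) "-_"

-- ===== PRECONDITION & SPEC =====
def Spec_sanitize_bank_segment_py (value : String) (out : String) : Prop := out = sanitize_bank_segment_py_alt value
instance (value : String) (out : String) : Decidable (Spec_sanitize_bank_segment_py value out) := by unfold Spec_sanitize_bank_segment_py; infer_instance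

-- ===== CLAIM (what is proved, stated in full; the proofs are below) =====
def Claim_equal_sanitize_bank_segment_py : Prop := ∀ (value : String), Dom_sanitize_bank_segment_py value → Spec_sanitize_bank_segment_py value (sanitize_bank_segment_py value)

-- ===== LEMMAS AND PROOFS =====

-- reference function: A's loop written as structural recursion on (prev_dash, chars)
def pvF : Bool → List Char → List Char
  | _, [] => []
  | b, c :: cs =>
    if pvAllowedB c then c :: pvF false cs
    else if b then pvF true cs else '-' :: pvF true cs

theorem pvFoldA_eq_pvF (l : List Char) (out : List Char) (b : Bool) :
    (l.foldl pvStepA (out, b)).1 = out ++ pvF b l := by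
  induction l generalizing out b with
  | nil => simp [pvF]
  | cons c cs ih =>
    simp only [List.foldl_cons, pvStepA, pvF, pvAllowedB]
    by_cases h : (PySem.Chars.isalnum c || c == '-' || c == '_') = true
    · simp [h, ih]
    · simp only [h]
      cases b with
      | false => simp [ih]
      | true => simp [ih]

theorem pvF_true_eq (l : List Char) :
    pvF true l = pvF false (l.dropWhile (fun c => !pvAllowedB c)) := by
  induction l with
  | nil => rfl
  | cons c cs ih =>
    by_cases h : pvAllowedB c
    · simp [pvF, h]
    · simp only [Bool.not_eq_true] at h
      simp [pvF, h, ih]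

theorem pvF_false_allowed_prefix (run rest : List Char)
    (hrun : ∀ c ∈ run, pvAllowedB c = true) :
    pvF false (run ++ rest) = run ++ pvF false rest := by
  induction run with
  | nil => rfl
  | cons c cs ih =>
    have hc : pvAllowedB c = true := hrun c (List.mem_cons_self ..)
    simp only [List.cons_append, pvF, hc, if_pos]
    exact congrArg _ (ih (fun c hc => hrun c (by simp [hc])))

theorem pvScanB_eq_pvF (l : List Char) : pvScanB l = pvF false l := by
  induction hn : l.length using Nat.strong_induction_on generalizing l with
  | _ n ih =>
  cases l with
  | nil => simp [pvScanB, pvF]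
  | cons c cs =>
    simp only [pvScanB]
    set k := pvAllowedB c with hk
    have hlen : (cs.dropWhile (fun d => pvAllowedB d == k)).length < n := by
      have := List.length_dropWhile_le (p := fun d => pvAllowedB d == k) (l := cs)
      simp [← hn]; omega
    have hrec := ih _ hlen (cs.dropWhile (fun d => pvAllowedB d == k)) rfl
    cases hkb : k with
    | true =>
      have hc : pvAllowedB c = true := by rw [hk] at hkb; exact hkb
      rw [hkb] at hrec
      simp only [if_pos, List.cons_append]
      rw [hrec]
      have hsplit : cs = cs.takeWhile (fun d => pvAllowedB d == true) ++
          cs.dropWhile (fun d => pvAllowedB d == true) := (List.takeWhile_append_dropWhile ..).symm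
      conv_rhs => rw [pvF, if_pos hc, hsplit]
      rw [pvF_false_allowed_prefix]
      intro x hx
      have := List.mem_takeWhile_imp hx
      simpa using this
    | false =>
      have hc : pvAllowedB c = false := by rw [hk] at hkb; exact hkb
      rw [hkb] at hrec
      simp only [Bool.false_eq_true, if_neg, not_false_iff, List.singleton_append]
      rw [hrec]
      conv_rhs => rw [pvF]
      simp only [hc, Bool.false_eq_true, if_neg, not_false_iff]
      rw [pvF_true_eq]
      congr 2
      exact congrFun (congrArg List.dropWhile (funext fun x => by simp)) cs

-- ===== VERDICT (by name: the statement is the Claim_ definition above) =====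
theorem sanitize_bank_segment_py_spec : Claim_equal_sanitize_bank_segment_py := by
  intro value _
  unfold Spec_sanitize_bank_segment_py sanitize_bank_segment_py sanitize_bank_segment_py_alt
  by_cases hv : value = ""
  · simp [hv]
  · simp only [hv, if_neg, not_false_iff]
    rw [pvScanB_eq_pvF, pvFoldA_eq_pvF value.toList [] false, List.nil_append]
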